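-- pv_equiv track=rewrite | github.com/viethuyvu/aoc2024 | day11.py | blink_one
-- ===== SOURCE A (Python) =====
-- def blink_one(stones):
--     new_stones = dict()
--     for stone, freq in stones.items():
--         if stone == 0:
--             if 1 in new_stones.keys():
--                 new_stones[1] += freq
--             else:
--                 new_stones[1] = freq
--         elif len(str(stone))%2 == 0:
--             mid = len(str(stone))//2
--             left = int(str(stone)[:mid])
--             right = int(str(stone)[mid:])
--             if left in new_stones.keys():
--                 new_stones[left] += freq
--             else:
--                 new_stones[left] = freq
--             if right in new_stones.keys():
--                 new_stones[right] += freq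
--             else:
--                 new_stones[right] = freq
--         else:
--             if stone*2024 in new_stones.keys():
--                 new_stones[stone*2024] += freq
--             else:
--                 new_stones[stone*2024] = freq
--     return new_stones
-- ===== SOURCE B (Python) =====
-- def _children(stone):
--     if stone == 0:
--         return [1]
--     s = str(stone)
--     if len(s) % 2 == 0:
--         mid = len(s) // 2
--         return [int(s[:mid]), int(s[mid:])]
--     return [stone * 2024]
--
-- def blink_one(stones):
--     pairs = [(c, f) for s, f in stones.items() for c in _children(s)]
--     order = list(dict.fromkeys(c for c, _ in pairs))
--     return {k: sum(f for c, f in pairs if c == k) for k in order}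
-- ===== Notes on version B (the rewrite author's own statement) =====
-- stated objective: alternative
-- what changed: A builds the result in one pass, mutating a dict with three duplicated contains-check-then-add blocks; B is staged: it first materializes the full flat list of (child, freq) pairs via a factored per-stone transform, then derives the key order by ordered dedup, then builds each entry by summing the matching pairs.
import Mathlib
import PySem

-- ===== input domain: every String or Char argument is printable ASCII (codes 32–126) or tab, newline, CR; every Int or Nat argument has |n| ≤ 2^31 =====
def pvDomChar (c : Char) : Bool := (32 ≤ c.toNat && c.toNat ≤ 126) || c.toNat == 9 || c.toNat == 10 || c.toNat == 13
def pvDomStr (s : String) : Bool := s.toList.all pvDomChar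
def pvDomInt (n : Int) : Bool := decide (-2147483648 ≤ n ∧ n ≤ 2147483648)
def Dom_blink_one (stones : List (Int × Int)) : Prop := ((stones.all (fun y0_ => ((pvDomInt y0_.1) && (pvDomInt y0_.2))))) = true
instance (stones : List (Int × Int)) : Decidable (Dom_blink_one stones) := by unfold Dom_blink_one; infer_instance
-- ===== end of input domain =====

-- B replaces A's single dict-mutating pass (three duplicated contains-check blocks) with a staged
-- group-by: flatten all (child, freq) pairs via a factored per-stone transform, dedup the keys in
-- first-occurrence order, then sum the matching pairs per key (objective: alternative decomposition).


-- ===== PORT A =====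
-- literal transliteration of A: one fold over the items with a PySem.Dict accumulator and three
-- contains-check branches; int(str(stone)[:mid]) is Int.ofChars? of a slice of Int.toChars
-- (the .getD 0 is never reached inside Pre_, which excludes exactly the inputs where Python raises)
def blink_one (stones : List (Int × Int)) : List (Int × Int) :=
  (stones.foldl (fun new_stones p =>
    let stone := p.1
    let freq := p.2
    if stone = 0 then
      if new_stones.contains 1 then
        new_stones.insert 1 (new_stones.getD 1 0 + freq)
      else
        new_stones.insert 1 freq
    else if (PySem.Int.toChars stone).length % 2 = 0 then
      let mid := (PySem.Int.toChars stone).length / 2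
      let left := (PySem.Int.ofChars? (PySem.List.slice (PySem.Int.toChars stone) none (some (mid : Int)))).getD 0
      let right := (PySem.Int.ofChars? (PySem.List.slice (PySem.Int.toChars stone) (some (mid : Int)) none)).getD 0
      let d1 := if new_stones.contains left then
          new_stones.insert left (new_stones.getD left 0 + freq)
        else
          new_stones.insert left freq
      if d1.contains right then
        d1.insert right (d1.getD right 0 + freq)
      else
        d1.insert right freq
    else
      if new_stones.contains (stone * 2024) then
        new_stones.insert (stone * 2024) (new_stones.getD (stone * 2024) 0 + freq)
      else
        new_stones.insert (stone * 2024) freq)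
    (PySem.Dict.empty : PySem.Dict Int Int)).items

-- ===== PORT B =====
def childrenB (stone : Int) : List Int :=
  if stone = 0 then [1]
  else if (PySem.Int.toChars stone).length % 2 = 0 then
    let mid := (PySem.Int.toChars stone).length / 2
    [(PySem.Int.ofChars? (PySem.List.slice (PySem.Int.toChars stone) none (some (mid : Int)))).getD 0,
     (PySem.Int.ofChars? (PySem.List.slice (PySem.Int.toChars stone) (some (mid : Int)) none)).getD 0]
  else [stone * 2024]

def blink_one_alt (stones : List (Int × Int)) : List (Int × Int) :=
  let pairs := stones.flatMap (fun p => (childrenB p.1).map (fun c => (c, p.2)))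
  let order := PySem.List.dedup (pairs.map (·.1))
  order.map (fun k => (k, ((pairs.filter (fun q => q.1 == k)).map (·.2)).sum))

-- ===== PRECONDITION & SPEC =====
-- Pre_ excludes only inputs on which Python A RAISES: a single-digit negative stone (-9..-1) has
-- str of even length 2, so A calls int("-") and raises ValueError (B raises there too).
def Pre_blink_one (stones : List (Int × Int)) : Prop :=
  ∀ p ∈ stones, ¬(-9 ≤ p.1 ∧ p.1 ≤ -1)
instance (stones : List (Int × Int)) : Decidable (Pre_blink_one stones) := by unfold Pre_blink_one; infer_instance
def pvWitness_blink_one : (List (Int × Int)) := [(0, 3), (17, 2), (-12, 1)]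
def Spec_blink_one (stones : List (Int × Int)) (out : List (Int × Int)) : Prop := out = blink_one_alt stones
instance (stones : List (Int × Int)) (out : List (Int × Int)) : Decidable (Spec_blink_one stones out) := by unfold Spec_blink_one; infer_instance

-- ===== CLAIM (what is proved, stated in full; the proofs are below) =====
def Claim_equal_blink_one : Prop := ∀ (stones : List (Int × Int)), Dom_blink_one stones → Pre_blink_one stones → Spec_blink_one stones (blink_one stones)

-- ===== LEMMAS AND PROOFS =====

-- the uniform accumulation step both sides reduce to: d[c] = d.get(c, 0) + f
def bumpStep (d : PySem.Dict Int Int) (q : Int × Int) : PySem.Dict Int Int :=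
  d.insert q.1 (d.getD q.1 0 + q.2)

-- A's contains-check-then-add block is bumpStep (when the key is absent, getD gives 0)
theorem bump_eq (d : PySem.Dict Int Int) (c f : Int) :
    (if d.contains c then d.insert c (d.getD c 0 + f) else d.insert c f) = bumpStep d (c, f) := by
  by_cases h : d.contains c
  · simp [bumpStep, h]
  · simp only [Bool.not_eq_true] at h
    simp [bumpStep, h, PySem.Dict.getD_of_not_contains]

-- A's per-stone branch is the bumpStep fold over childrenB of that stone
theorem stepA_eq (d : PySem.Dict Int Int) (p : Int × Int) :
    (if p.1 = 0 then
      if d.contains 1 then d.insert 1 (d.getD 1 0 + p.2) else d.insert 1 p.2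
    else if (PySem.Int.toChars p.1).length % 2 = 0 then
      let mid := (PySem.Int.toChars p.1).length / 2
      let left := (PySem.Int.ofChars? (PySem.List.slice (PySem.Int.toChars p.1) none (some (mid : Int)))).getD 0
      let right := (PySem.Int.ofChars? (PySem.List.slice (PySem.Int.toChars p.1) (some (mid : Int)) none)).getD 0
      let d1 := if d.contains left then d.insert left (d.getD left 0 + p.2) else d.insert left p.2
      if d1.contains right then d1.insert right (d1.getD right 0 + p.2) else d1.insert right p.2
    else
      if d.contains (p.1 * 2024) then d.insert (p.1 * 2024) (d.getD (p.1 * 2024) 0 + p.2)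
      else d.insert (p.1 * 2024) p.2)
    = ((childrenB p.1).map (fun c => (c, p.2))).foldl bumpStep d := by
  unfold childrenB
  by_cases h0 : p.1 = 0
  · simp [h0, bump_eq]
  · by_cases h2 : (PySem.Int.toChars p.1).length % 2 = 0
    · simp [h0, h2, bump_eq]
    · simp [h0, h2, bump_eq]

-- loop invariant: each accumulated value is the old value plus the sum of the matching pair freqs
theorem getD_foldl_bump (ps : List (Int × Int)) (d : PySem.Dict Int Int) (k : Int) :
    (ps.foldl bumpStep d).getD k 0 = d.getD k 0 + ((ps.filter (fun q => q.1 == k)).map (·.2)).sum := by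
  induction ps generalizing d with
  | nil => simp
  | cons q ps ih =>
    simp only [List.foldl_cons, ih, List.filter_cons]
    by_cases h : q.1 = k
    · simp [bumpStep, h]
      ring
    · simp [bumpStep, h, PySem.Dict.getD_insert]
      exact fun hk => absurd hk.symm h

theorem keys_foldl_bump (l : List (Int × Int)) (d : PySem.Dict Int Int) :
    (l.foldl bumpStep d).keys = PySem.Set.update d.keys (l.map (·.1)) :=
  PySem.Dict.keys_foldl_insert_key l (·.1) (fun d q => d.getD q.1 0 + q.2) d

theorem nodup_keys_foldl_bump (l : List (Int × Int)) (d : PySem.Dict Int Int) (h : d.keys.Nodup) :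
    (l.foldl bumpStep d).keys.Nodup :=
  PySem.Dict.nodup_keys_foldl_insert_key l (·.1) (fun d q => d.getD q.1 0 + q.2) d h

-- ===== VERDICT (by name: the statement is the Claim_ definition above) =====
theorem blink_one_spec : Claim_equal_blink_one := by
  intro stones _ _
  show blink_one stones = blink_one_alt stones
  unfold blink_one blink_one_alt
  simp only [stepA_eq, ← List.foldl_flatMap]
  set pairs := stones.flatMap (fun p => (childrenB p.1).map (fun c => (c, p.2))) with hp
  rw [PySem.Dict.items_eq_map_keys _ (nodup_keys_foldl_bump pairs _ PySem.Dict.nodup_keys_empty) 0,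
      keys_foldl_bump]
  have hord : PySem.Set.update (PySem.Dict.empty : PySem.Dict Int Int).keys (pairs.map (·.1))
      = PySem.List.dedup (pairs.map (·.1)) := by
    simp only [PySem.List.dedup_eq_ofList, PySem.Dict.keys_empty]
    rfl
  rw [hord]
  apply List.map_congr_left
  intro k _
  rw [getD_foldl_bump]
  simp
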